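-- pv_equiv track=rewrite | github.com/linzeyang/leetcode-solutions | easy/3754.py | sumAndMultiply
-- ===== SOURCE A (Python) =====
-- def sumAndMultiply(n: int) -> int:
--     if not n:
--         return 0
--
--     x: int = 0
--     summ: int = 0
--
--     for char in str(n):
--         if char == "0":
--             continue
--
--         x = x * 10 + int(char)
--         summ += int(char)
--
--     return x * summ
-- ===== SOURCE B (Python) =====
-- def sumAndMultiply(n: int) -> int:
--     # Arithmetic digit extraction: no string conversion; builds the
--     # zero-free number back-to-front (least significant digit first)
--     # with an explicit place-value accumulator.
--     x = 0
--     summ = 0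
--     pow10 = 1
--     m = n
--     while m > 0:
--         m, d = divmod(m, 10)
--         summ += d
--         if d:
--             x += d * pow10
--             pow10 *= 10
--     return x * summ
-- ===== Notes on version B (the rewrite author's own statement) =====
-- stated objective: alternative
-- what changed: Replaces A's string conversion and per-character int() parsing with pure arithmetic: a divmod loop extracts digits least-significant first and rebuilds the zero-free number back-to-front with an explicit place-value accumulator.
import Mathlib
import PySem

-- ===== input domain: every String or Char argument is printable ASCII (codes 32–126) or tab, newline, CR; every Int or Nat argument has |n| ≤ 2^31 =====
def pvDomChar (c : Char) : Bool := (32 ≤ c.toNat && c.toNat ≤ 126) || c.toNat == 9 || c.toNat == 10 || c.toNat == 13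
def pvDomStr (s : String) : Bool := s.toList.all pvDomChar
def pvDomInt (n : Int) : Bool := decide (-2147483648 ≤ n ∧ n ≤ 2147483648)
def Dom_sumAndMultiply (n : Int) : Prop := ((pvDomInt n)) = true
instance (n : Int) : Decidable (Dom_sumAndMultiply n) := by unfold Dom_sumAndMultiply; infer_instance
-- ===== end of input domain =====

-- B replaces A's string/int()-parsing loop with an arithmetic divmod loop that
-- rebuilds the zero-free number back-to-front; return values proved equal for n ≥ 0.

-- ===== PORT A =====
-- int(char) for a single character; the `getD 0` default is never reached under
-- Pre_ (every character of str(n) for n ≥ 0 is a decimal digit, where ofChars? succeeds).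
def pvDv (c : Char) : Int := (PySem.Int.ofChars? [c]).getD 0

def sumAndMultiply (n : Int) : Int :=
  if n = 0 then 0
  else
    let r := (PySem.Int.toStr n).toList.foldl
      (fun (p : Int × Int) c => if c == '0' then p else (p.1 * 10 + pvDv c, p.2 + pvDv c))
      (0, 0)
    r.1 * r.2

-- ===== PORT B =====
-- while m > 0: m, d = divmod(m, 10); summ += d; if d: x += d * pow10; pow10 *= 10
def pvBLoop (m x summ pow10 : Int) : Int × Int :=
  if h : 0 < m then
    if PySem.Int.mod m 10 ≠ 0 then
      pvBLoop (PySem.Int.floordiv m 10) (x + PySem.Int.mod m 10 * pow10)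
        (summ + PySem.Int.mod m 10) (pow10 * 10)
    else pvBLoop (PySem.Int.floordiv m 10) x (summ + PySem.Int.mod m 10) pow10
  else (x, summ)
termination_by m.toNat
decreasing_by
  all_goals
    simp only [PySem.Int.floordiv, Int.fdiv_eq_ediv]
    norm_num
    omega

def sumAndMultiply_alt (n : Int) : Int :=
  let r := pvBLoop n 0 0 1
  r.1 * r.2

-- ===== PRECONDITION & SPEC =====
-- Pre_ excludes negative n, on which A raises ValueError (int('-') on the sign character).
def Pre_sumAndMultiply (n : Int) : Prop := 0 ≤ n
instance (n : Int) : Decidable (Pre_sumAndMultiply n) := by unfold Pre_sumAndMultiply; infer_instance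
def pvWitness_sumAndMultiply : Int := 103

def Spec_sumAndMultiply (n : Int) (out : Int) : Prop := out = sumAndMultiply_alt n
instance (n : Int) (out : Int) : Decidable (Spec_sumAndMultiply n out) := by unfold Spec_sumAndMultiply; infer_instance

-- ===== CLAIM (what is proved, stated in full; the proofs are below) =====
def Claim_equal_sumAndMultiply : Prop := ∀ (n : Int), Dom_sumAndMultiply n → Pre_sumAndMultiply n → Spec_sumAndMultiply n (sumAndMultiply n)

-- ===== LEMMAS AND PROOFS =====

-- Nat-level model of A's loop (digits MSB-first).
def pvNFold : List Nat → Int × Int → Int × Int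
  | [], p => p
  | k :: L, p => pvNFold L (if k = 0 then p else (p.1 * 10 + (k : Int), p.2 + (k : Int)))

-- LSB-first model of B's loop.
def pvBSpec : List Nat → Int → Int → Int → Int × Int
  | [], x, s, _ => (x, s)
  | k :: l, x, s, p =>
    if k = 0 then pvBSpec l x (s + (k : Int)) p
    else pvBSpec l (x + (k : Int) * p) (s + (k : Int)) (p * 10)

-- value of the zero-free digit list, LSB-first
def pvVal : List Nat → Int
  | [] => 0
  | k :: l => if k = 0 then pvVal l else (k : Int) + 10 * pvVal l

lemma pvDv_digitChar (k : Nat) (hk : k < 10) :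
    pvDv (Nat.digitChar k) = (k : Int) ∧ ((Nat.digitChar k == '0') = decide (k = 0)) := by
  interval_cases k <;> exact ⟨by decide, by decide⟩

lemma toDigitsCore_eq (f : Nat) : ∀ (n : Nat) (l : List Char), 0 < n → n ≤ f →
    Nat.toDigitsCore 10 f n l = ((Nat.digits 10 n).map Nat.digitChar).reverse ++ l := by
  induction f with
  | zero => intro n l hn hf; omega
  | succ f ih =>
    intro n l hn hf
    rw [Nat.digits_def' (by norm_num : 1 < 10) hn]
    simp only [Nat.toDigitsCore, List.map_cons, List.reverse_cons]
    by_cases hq : n / 10 = 0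
    · simp [hq, Nat.digits_zero]
    · have hq' : 0 < n / 10 := Nat.pos_of_ne_zero hq
      have hle : n / 10 ≤ f := by
        have := Nat.div_lt_self hn (by norm_num : 1 < 10)
        omega
      simp only [hq, if_false]
      rw [ih (n / 10) _ hq' hle]
      simp

lemma toDigits_eq (n : Nat) (hn : 0 < n) :
    Nat.toDigits 10 n = ((Nat.digits 10 n).map Nat.digitChar).reverse := by
  have := toDigitsCore_eq (n + 1) n [] hn (by omega)
  simpa [Nat.toDigits] using this

-- A's char fold equals the Nat-level model on the underlying digit list.
lemma afold_map (L : List Nat) (hL : ∀ k ∈ L, k < 10) (p : Int × Int) :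
    (L.map Nat.digitChar).foldl
      (fun (p : Int × Int) c => if c == '0' then p else (p.1 * 10 + pvDv c, p.2 + pvDv c)) p
    = pvNFold L p := by
  induction L generalizing p with
  | nil => rfl
  | cons k l ih =>
    have hk := hL k (List.mem_cons_self ..)
    obtain ⟨hdv, heq⟩ := pvDv_digitChar k hk
    simp only [List.map_cons, List.foldl_cons, pvNFold, hdv, heq]
    by_cases h0 : k = 0
    · simp only [h0, decide_true, if_true]
      exact ih (fun j hj => hL j (List.mem_cons_of_mem _ hj)) p
    · simp only [h0, decide_false, if_false, Bool.false_eq_true]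
      exact ih (fun j hj => hL j (List.mem_cons_of_mem _ hj)) _

lemma pvNFold_append (a b : List Nat) (p : Int × Int) :
    pvNFold (a ++ b) p = pvNFold b (pvNFold a p) := by
  induction a generalizing p with
  | nil => rfl
  | cons k l ih => simp only [List.cons_append, pvNFold, ih]

-- closed form for A's fold, digits given LSB-first and reversed
lemma nfold_reverse (l : List Nat) (x s : Int) :
    pvNFold l.reverse (x, s)
      = (x * (10 : Int) ^ (l.filter (fun k => k ≠ 0)).length + pvVal l, s + (l.sum : Int)) := by
  induction l generalizing x s with
  | nil => simp [pvNFold, pvVal]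
  | cons k l ih =>
    rw [List.reverse_cons, pvNFold_append, ih]
    by_cases h0 : k = 0
    · simp [pvNFold, pvVal, h0, List.filter_cons, Prod.ext_iff]
      try constructor
      all_goals push_cast
      all_goals ring
    · simp [pvNFold, pvVal, h0, List.filter_cons, Prod.ext_iff]
      try constructor
      all_goals push_cast
      all_goals ring

-- closed form for B's loop model
lemma bspec_closed (l : List Nat) (x s p : Int) :
    pvBSpec l x s p = (x + p * pvVal l, s + (l.sum : Int)) := by
  induction l generalizing x s p with
  | nil => simp [pvBSpec, pvVal]
  | cons k l ih =>
    simp only [pvBSpec, pvVal]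
    by_cases h0 : k = 0
    · simp [h0, ih, Prod.ext_iff]
      try constructor
      all_goals push_cast
      all_goals ring
    · simp [h0, ih, Prod.ext_iff]
      try constructor
      all_goals push_cast
      all_goals ring

-- B's loop follows the LSB-first digit list of m
lemma bLoop_eq_bspec (m : Int) (hm : 0 ≤ m) : ∀ (x s p : Int),
    pvBLoop m x s p = pvBSpec (Nat.digits 10 m.toNat) x s p := by
  induction hk : m.toNat using Nat.strong_induction_on generalizing m with
  | _ k ih =>
    subst hk
    intro x s p
    rw [pvBLoop]
    by_cases hpos : 0 < m
    · have hq0 : PySem.Int.floordiv m 10 = ((m.toNat / 10 : Nat) : Int) := by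
        simp only [PySem.Int.floordiv, Int.fdiv_eq_ediv]
        norm_num; omega
      have hd0 : PySem.Int.mod m 10 = ((m.toNat % 10 : Nat) : Int) := by
        simp only [PySem.Int.mod, Int.fmod_eq_emod]
        norm_num; omega
      have hqnat : (PySem.Int.floordiv m 10).toNat = m.toNat / 10 := by
        rw [hq0]; omega
      have hqlt : m.toNat / 10 < m.toNat := Nat.div_lt_self (by omega) (by norm_num)
      have hqnn : 0 ≤ PySem.Int.floordiv m 10 := by rw [hq0]; positivity
      have hdig : Nat.digits 10 m.toNat
          = m.toNat % 10 :: Nat.digits 10 (m.toNat / 10) :=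
        Nat.digits_def' (by norm_num) (by omega)
      rw [dif_pos hpos, hdig]
      simp only [pvBSpec]
      by_cases hd : PySem.Int.mod m 10 ≠ 0
      · have hdn : ¬ (m.toNat % 10 = 0) := by
          rw [hd0] at hd; omega
        rw [if_pos hd, if_neg hdn, ih _ hqlt _ hqnn hqnat, hd0]
      · have hdn : (m.toNat % 10 = 0) := by
          rw [hd0] at hd; omega
        rw [if_neg hd, if_pos hdn, ih _ hqlt _ hqnn hqnat, hd0]
    · have hm0 : m = 0 := by omega
      subst hm0
      norm_num [pvBSpec]

-- ===== VERDICT (by name: the statement is the Claim_ definition above) =====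
theorem sumAndMultiply_spec : Claim_equal_sumAndMultiply := by
  intro n _ hpre
  unfold Spec_sumAndMultiply sumAndMultiply sumAndMultiply_alt
  by_cases hz : n = 0
  · subst hz
    rw [pvBLoop]
    norm_num
  · have hn : 0 < n := lt_of_le_of_ne hpre (Ne.symm hz)
    have hnat : 0 < n.toNat := by omega
    rw [if_neg hz]
    have hchars : (PySem.Int.toStr n).toList = Nat.toDigits 10 n.toNat := by
      rw [PySem.Int.toList_toStr]
      simp [PySem.Int.toChars, not_lt_of_ge hpre]
    set l := Nat.digits 10 n.toNat with hl
    have hlt : ∀ k ∈ l.reverse, k < 10 := by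
      intro k hk
      exact Nat.digits_lt_base (by norm_num) (List.mem_reverse.mp hk)
    have hA : (PySem.Int.toStr n).toList.foldl
        (fun (p : Int × Int) c => if c == '0' then p else (p.1 * 10 + pvDv c, p.2 + pvDv c)) (0, 0)
        = pvNFold l.reverse (0, 0) := by
      rw [hchars, toDigits_eq _ hnat, ← List.map_reverse, afold_map _ hlt]
    rw [hA, nfold_reverse, bLoop_eq_bspec n hpre, ← hl, bspec_closed]
    simp
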